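-- pv_equiv track=rewrite | github.com/bottleling/scratches | composeRanges.py | composeRanges
-- ===== SOURCE A (Python) =====
-- def composeRanges(nums):
--     if len(nums) == 0:
--         return []
--     if len(nums) == 1:
--         return [str(nums[0])]
--     s = nums[0]
--     e = nums[0]
--     res = []
--     for i in range(1, len(nums)):
--         if nums[i] - nums[i - 1] > 1:
--             if e == s:
--                 res.append(str(s))
--             else:
--                 res.append("%d->%d" % (s, e))
--             s = nums[i]
--         e = nums[i]
--     if e == s:
--         res.append(str(s))
--     else:
--         res.append("%d->%d" % (s, e))
--     return res
-- ===== SOURCE B (Python) =====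
-- def composeRanges(nums):
--     # Phase 1: compute the break positions (indices where a >1 gap occurs),
--     # giving a list of cut points; Phase 2: format each [cut, next cut) segment.
--     if not nums:
--         return []
--     n = len(nums)
--     cuts = [0] + [i for i in range(1, n) if nums[i] - nums[i - 1] > 1] + [n]
--     return [str(nums[a]) if nums[a] == nums[b - 1]
--             else "%d->%d" % (nums[a], nums[b - 1])
--             for a, b in zip(cuts, cuts[1:])]
-- ===== Notes on version B (the rewrite author's own statement) =====
-- stated objective: alternative
-- what changed: B first computes the list of break indices (positions with gap > 1) as cut points, then formats each segment between consecutive cuts by indexing nums, instead of A's stateful streaming scan that flushes start/end variables as it goes.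
import Mathlib
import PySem

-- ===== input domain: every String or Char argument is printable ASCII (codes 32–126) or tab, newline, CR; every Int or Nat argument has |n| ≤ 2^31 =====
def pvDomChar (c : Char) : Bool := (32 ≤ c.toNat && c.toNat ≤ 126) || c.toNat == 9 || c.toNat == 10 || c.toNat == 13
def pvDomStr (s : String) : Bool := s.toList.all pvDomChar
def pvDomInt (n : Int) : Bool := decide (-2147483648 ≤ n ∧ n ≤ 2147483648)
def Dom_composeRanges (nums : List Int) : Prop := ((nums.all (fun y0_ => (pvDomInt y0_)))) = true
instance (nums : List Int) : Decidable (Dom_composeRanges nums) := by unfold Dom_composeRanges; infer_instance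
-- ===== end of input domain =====

-- B first computes the break positions (cut indices) and then formats each
-- segment between consecutive cuts by indexing; an alternative to A's stateful scan.

-- ===== PORT A =====
-- A's `for i in range(1, len(nums))` reads nums[i] and nums[i-1]; ported as a
-- fold over the list of adjacent pairs nums.zip nums.tail with state (s, e, res).
def composeRanges (nums : List Int) : List String :=
  match nums with
  | [] => []
  | [x] => [PySem.Int.toStr x]
  | x :: _ =>
    let st := (nums.zip nums.tail).foldl
      (fun (st : Int × Int × List String) (pc : Int × Int) =>
        let (s, e, res) := st
        let (p, c) := pc
        if c - p > 1 then
          (c, c, res ++ [if e == s then PySem.Int.toStr s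
                         else PySem.Int.toStr s ++ "->" ++ PySem.Int.toStr e])
        else (s, c, res))
      (x, x, ([] : List String))
    st.2.2 ++ [if st.2.1 == st.1 then PySem.Int.toStr st.1
               else PySem.Int.toStr st.1 ++ "->" ++ PySem.Int.toStr st.2.1]

-- ===== PORT B =====
-- Source B: cuts = [0] + [i for i in range(1, n) if nums[i] - nums[i-1] > 1] + [n];
-- then one string per consecutive cut pair (a, b), from nums[a] and nums[b-1].
-- Python's nums[i] on these always-in-range indices is ported as pyGetD _ _ 0 (exact here).
def composeRanges_alt (nums : List Int) : List String :=
  if nums = [] then []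
  else
    let n : Int := nums.length
    let cuts := (0 :: (PySem.List.pyRange 1 n 1).filter
        (fun i => PySem.List.pyGetD nums i 0 - PySem.List.pyGetD nums (i - 1) 0 > 1)) ++ [n]
    (cuts.zip cuts.tail).map (fun ab =>
      if PySem.List.pyGetD nums ab.1 0 == PySem.List.pyGetD nums (ab.2 - 1) 0
      then PySem.Int.toStr (PySem.List.pyGetD nums ab.1 0)
      else PySem.Int.toStr (PySem.List.pyGetD nums ab.1 0) ++ "->"
            ++ PySem.Int.toStr (PySem.List.pyGetD nums (ab.2 - 1) 0))

-- ===== PRECONDITION & SPEC =====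
def Spec_composeRanges (nums : List Int) (out : List String) : Prop := out = composeRanges_alt nums
instance (nums : List Int) (out : List String) : Decidable (Spec_composeRanges nums out) := by unfold Spec_composeRanges; infer_instance

-- ===== CLAIM (what is proved, stated in full; the proofs are below) =====
def Claim_equal_composeRanges : Prop := ∀ (nums : List Int), Dom_composeRanges nums → Spec_composeRanges nums (composeRanges nums)

-- ===== LEMMAS AND PROOFS =====

def pvFmt (ab : Int × Int) : String :=
  if ab.1 == ab.2 then PySem.Int.toStr ab.1
  else PySem.Int.toStr ab.1 ++ "->" ++ PySem.Int.toStr ab.2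

theorem pvFmt_comm (s e : Int) :
    (if e == s then PySem.Int.toStr s
     else PySem.Int.toStr s ++ "->" ++ PySem.Int.toStr e) = pvFmt (s, e) := by
  simp only [pvFmt]
  by_cases h : s = e
  · simp [h]
  · rw [if_neg (by simpa using fun h' => h h'.symm), if_neg (by simpa using h)]

-- the common recursive description of the runs: state (start, end) of the open run
def pvRuns (s e : Int) : List Int → List (Int × Int)
  | [] => [(s, e)]
  | x :: r => if x - e > 1 then (s, e) :: pvRuns x x r else pvRuns s x r

-- ---- A side ----
def pvStepA (st : Int × Int × List String) (pc : Int × Int) : Int × Int × List String :=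
  let (s, e, res) := st
  let (p, c) := pc
  if c - p > 1 then
    (c, c, res ++ [if e == s then PySem.Int.toStr s
                   else PySem.Int.toStr s ++ "->" ++ PySem.Int.toStr e])
  else (s, c, res)

def pvFinish (st : Int × Int × List String) : List String :=
  st.2.2 ++ [if st.2.1 == st.1 then PySem.Int.toStr st.1
             else PySem.Int.toStr st.1 ++ "->" ++ PySem.Int.toStr st.2.1]

theorem pvLoopA (rest : List Int) : ∀ (s e : Int) (acc : List String),
    pvFinish (((e :: rest).zip rest).foldl pvStepA (s, e, acc)) =
      acc ++ (pvRuns s e rest).map pvFmt := by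
  induction rest with
  | nil =>
    intro s e acc
    simp only [List.zip_nil_right, List.foldl_nil, pvFinish, pvRuns, List.map_cons, List.map_nil]
    rw [pvFmt_comm]
  | cons x r ih =>
    intro s e acc
    simp only [List.zip_cons_cons, List.foldl_cons, pvRuns]
    by_cases h : x - e > 1
    · rw [show pvStepA (s, e, acc) (e, x)
            = (x, x, acc ++ [if e == s then PySem.Int.toStr s
                             else PySem.Int.toStr s ++ "->" ++ PySem.Int.toStr e]) from by
          simp [pvStepA, h], ih, pvFmt_comm]
      simp [h]
    · rw [show pvStepA (s, e, acc) (e, x) = (s, x, acc) from by simp [pvStepA, h], ih]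
      simp [h]

theorem composeRanges_eq_runs (x : Int) (rest : List Int) :
    composeRanges (x :: rest) = (pvRuns x x rest).map pvFmt := by
  cases rest with
  | nil => simp [composeRanges, pvRuns, pvFmt]
  | cons y r =>
    show pvFinish (((x :: y :: r).zip (y :: r)).foldl pvStepA (x, x, [])) = _
    rw [show (x :: y :: r).zip (y :: r) = ((x :: (y :: r)).zip (y :: r)) from rfl]
    rw [pvLoopA (y :: r) x x []]
    simp

-- ---- B side ----
-- break indices of the suffix `rest` starting at absolute index j, prev element p
def pvBreaks (j : Int) (p : Int) : List Int → List Int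
  | [] => []
  | x :: r => if x - p > 1 then j :: pvBreaks (j + 1) x r else pvBreaks (j + 1) x r

def pvSeg (nums : List Int) (a b : Int) : String :=
  if PySem.List.pyGetD nums a 0 == PySem.List.pyGetD nums (b - 1) 0
  then PySem.Int.toStr (PySem.List.pyGetD nums a 0)
  else PySem.Int.toStr (PySem.List.pyGetD nums a 0) ++ "->"
        ++ PySem.Int.toStr (PySem.List.pyGetD nums (b - 1) 0)

def pvSegs (nums : List Int) (a : Int) : List Int → List String
  | [] => []
  | b :: bs => pvSeg nums a b :: pvSegs nums b bs

theorem pvZipMap_eq_pvSegs (nums : List Int) (a : Int) (cs : List Int) :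
    (((a :: cs).zip cs).map (fun ab =>
      if PySem.List.pyGetD nums ab.1 0 == PySem.List.pyGetD nums (ab.2 - 1) 0
      then PySem.Int.toStr (PySem.List.pyGetD nums ab.1 0)
      else PySem.Int.toStr (PySem.List.pyGetD nums ab.1 0) ++ "->"
            ++ PySem.Int.toStr (PySem.List.pyGetD nums (ab.2 - 1) 0)))
      = pvSegs nums a cs := by
  induction cs generalizing a with
  | nil => rfl
  | cons b bs ih => simp only [List.zip_cons_cons, List.map_cons, pvSegs, ih]; rfl

-- a valid lookup at Nat index k, phrased for pyGetD
theorem pvGetD_of_drop (nums rest : List Int) (k : Nat) (p : Int)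
    (hd : nums.drop k = p :: rest) :
    PySem.List.pyGetD nums (k : Int) 0 = p := by
  rw [PySem.List.pyGetD_natCast, List.getD_eq_getElem?_getD]
  have h0 : (nums.drop k)[0]? = some p := by rw [hd]; rfl
  rw [List.getElem?_drop] at h0
  simpa using congrArg (Option.getD · 0) h0

-- the filter over range(1, n) computes exactly the recursive break list
theorem pvFilter_eq_pvBreaks (nums : List Int) :
    ∀ (rest : List Int) (j : Nat) (p : Int), 1 ≤ j →
      nums.drop (j - 1) = p :: rest →
      (PySem.List.pyRange (j : Int) (nums.length : Int) 1).filter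
        (fun i => decide (PySem.List.pyGetD nums i 0 - PySem.List.pyGetD nums (i - 1) 0 > 1))
        = pvBreaks (j : Int) p rest := by
  intro rest
  induction rest with
  | nil =>
    intro j p hj hd
    have hlen : nums.length = j := by
      have := congrArg List.length hd
      simp [List.length_drop] at this
      omega
    rw [PySem.List.pyRange_one_eq_nil (by omega)]
    rfl
  | cons x r ih =>
    intro j p hj hd
    have hlen : (nums.drop (j-1)).length = r.length + 2 := by rw [hd]; simp
    rw [List.length_drop] at hlen
    have hjlt : (j : Int) < (nums.length : Int) := by omega
    have hdj : nums.drop j = x :: r := by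
      have := congrArg List.tail hd
      rw [List.tail_drop] at this
      simpa [show j - 1 + 1 = j from by omega] using this
    have hx : PySem.List.pyGetD nums (j : Int) 0 = x := pvGetD_of_drop nums r j x hdj
    have hp : PySem.List.pyGetD nums ((j : Int) - 1) 0 = p := by
      rw [show (j : Int) - 1 = ((j - 1 : Nat) : Int) from by omega]
      exact pvGetD_of_drop nums (x :: r) (j-1) p hd
    rw [PySem.List.pyRange_one_cons hjlt, List.filter_cons, hx, hp]
    have ihx := ih (j+1) x (by omega) (by simpa [show j + 1 - 1 = j from by omega] using hdj)
    rw [show ((j+1 : Nat) : Int) = (j : Int) + 1 from by push_cast; ring] at ihx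
    by_cases hgap : x - p > 1
    · rw [if_pos (by simpa using hgap), ihx]
      simp [pvBreaks, hgap]
    · rw [if_neg (by simpa using hgap), ihx]
      simp [pvBreaks, hgap]

-- main invariant: formatting the segments cut at the break indices of the
-- remaining suffix equals formatting the recursively computed runs
theorem pvSegLoop (nums : List Int) :
    ∀ (rest : List Int) (j : Nat) (cs s e : Int), 1 ≤ j → j ≤ nums.length →
      nums.drop j = rest →
      PySem.List.pyGetD nums cs 0 = s →
      PySem.List.pyGetD nums ((j : Int) - 1) 0 = e →
      pvSegs nums cs (pvBreaks (j : Int) e rest ++ [(nums.length : Int)])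
        = (pvRuns s e rest).map pvFmt := by
  intro rest
  induction rest with
  | nil =>
    intro j cs s e hj hjle hd hcs he
    have hlen : nums.length = j := by
      have := congrArg List.length hd
      simp [List.length_drop] at this
      omega
    simp only [pvBreaks, List.nil_append, pvSegs, pvRuns, List.map_cons, List.map_nil]
    congr 1
    rw [pvSeg, hlen, hcs, he]
    simp only [pvFmt]
  | cons x r ih =>
    intro j cs s e hj hjle hd hcs he
    have hx : PySem.List.pyGetD nums (j : Int) 0 = x := pvGetD_of_drop nums r j x hd
    have hlen : (nums.drop j).length = r.length + 1 := by rw [hd]; simp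
    rw [List.length_drop] at hlen
    have hdj1 : nums.drop (j+1) = r := by
      have := congrArg List.tail hd
      rw [List.tail_drop] at this
      simpa using this
    have hxj1 : PySem.List.pyGetD nums (((j+1 : Nat) : Int) - 1) 0 = x := by
      simpa [show ((j+1 : Nat) : Int) - 1 = (j : Int) from by push_cast; ring] using hx
    simp only [pvBreaks, pvRuns]
    by_cases hgap : x - e > 1
    · rw [if_pos hgap, if_pos hgap]
      simp only [List.cons_append, pvSegs, List.map_cons]
      congr 1
      · rw [pvSeg, hcs, he]
        simp only [pvFmt]
      · have := ih (j+1) (j : Int) x x (by omega) (by omega) hdj1 hx hxj1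
        rw [show ((j+1 : Nat) : Int) = (j : Int) + 1 from by push_cast; ring] at this
        exact this
    · rw [if_neg hgap, if_neg hgap]
      have := ih (j+1) cs s x (by omega) (by omega) hdj1 hcs hxj1
      rw [show ((j+1 : Nat) : Int) = (j : Int) + 1 from by push_cast; ring] at this
      exact this

-- ===== VERDICT (by name: the statement is the Claim_ definition above) =====
theorem composeRanges_spec : Claim_equal_composeRanges := by
  intro nums _
  show composeRanges nums = composeRanges_alt nums
  match nums with
  | [] => rfl
  | x :: rest =>
    rw [composeRanges_eq_runs]
    rw [composeRanges_alt, if_neg (by simp)]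
    dsimp only
    have hb := pvFilter_eq_pvBreaks (x :: rest) rest 1 x (by omega) (by simp)
    simp only [Nat.cast_one] at hb
    rw [hb]
    have hs := pvSegLoop (x :: rest) rest 1 0 x x (by omega) (by simp)
      (by simp) (by simp [PySem.List.pyGetD_zero_cons])
      (by simp [PySem.List.pyGetD_zero_cons])
    simp only [Nat.cast_one] at hs
    exact ((pvZipMap_eq_pvSegs (x :: rest) 0
      (pvBreaks 1 x rest ++ [((x :: rest).length : Int)])).trans hs).symm
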